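-- pv_equiv track=rewrite | github.com/ellimac-lg/csv_films | csv_films.py | by_descriptor
-- ===== SOURCE A (Python) =====
-- KEY_FIELD = "Titre"
--
-- def by_descriptor(films_by_title, descriptor):
--     "builds an index for a given descriptor"
--     films_by_descriptor = {}
--     for film in films_by_title.values():
--         value = film[descriptor]
--         if value not in films_by_descriptor:
--             films_by_descriptor[value] = []
--         films_by_descriptor[value].append(film[KEY_FIELD])
--     return dict(sorted(films_by_descriptor.items()))
-- ===== SOURCE B (Python) =====
-- KEY_FIELD = "Titre"
--
-- def by_descriptor(films_by_title, descriptor):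
--     "builds an index for a given descriptor"
--     films = list(films_by_title.values())
--     values = sorted({film[descriptor] for film in films})
--     return {v: [film[KEY_FIELD] for film in films if film[descriptor] == v]
--             for v in values}
-- ===== Notes on version B (the rewrite author's own statement) =====
-- stated objective: simpler
-- what changed: Replaces the incremental dict-of-lists accumulation plus final item sort by: collect the distinct descriptor values as a set, sort them once, then build each group with a single filtering comprehension per value.
import Mathlib
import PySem

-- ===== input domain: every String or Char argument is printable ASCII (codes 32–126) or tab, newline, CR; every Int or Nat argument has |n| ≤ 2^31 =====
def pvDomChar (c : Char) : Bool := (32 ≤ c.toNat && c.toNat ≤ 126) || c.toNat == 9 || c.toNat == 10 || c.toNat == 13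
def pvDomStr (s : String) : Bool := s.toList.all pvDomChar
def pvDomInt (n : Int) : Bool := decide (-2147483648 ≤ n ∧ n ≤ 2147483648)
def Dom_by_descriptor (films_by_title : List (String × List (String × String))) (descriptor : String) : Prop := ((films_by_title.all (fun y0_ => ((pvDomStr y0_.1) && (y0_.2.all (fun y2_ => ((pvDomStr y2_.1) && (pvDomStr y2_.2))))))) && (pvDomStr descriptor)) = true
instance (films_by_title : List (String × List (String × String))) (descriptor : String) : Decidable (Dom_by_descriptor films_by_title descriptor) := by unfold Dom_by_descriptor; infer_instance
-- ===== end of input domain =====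

-- B replaces A's incremental dict-of-lists grouping (then item sort) by a one-shot
-- sorted set of the descriptor values followed by a filtering pass per value: simpler.

-- ===== PORT A =====
-- Pre_ guarantees every film contains both keys, so the getD defaults "" never fire.
-- The dict has distinct keys, so Python's sorted(items()) (tuple order) = sort by key.
def by_descriptor (films_by_title : List (String × List (String × String))) (descriptor : String) : List (String × List String) :=
  let films := (PySem.Dict.ofList films_by_title).values
  let fbd := films.foldl (fun fbd film =>
      let value := (PySem.Dict.ofList film).getD descriptor ""
      let fbd := if fbd.contains value then fbd else fbd.insert value ([] : List String)
      fbd.modify value [] (fun l => l ++ [(PySem.Dict.ofList film).getD "Titre" ""]))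
    PySem.Dict.empty
  PySem.List.sorted fbd.items (fun p => p.1) false

-- ===== PORT B =====
def by_descriptor_alt (films_by_title : List (String × List (String × String))) (descriptor : String) : List (String × List String) :=
  let films := (PySem.Dict.ofList films_by_title).values
  let vals := PySem.List.sorted
      (PySem.Set.ofList (films.map (fun film => (PySem.Dict.ofList film).getD descriptor "")))
      (fun v => v) false
  vals.map (fun v =>
    (v, (films.filter (fun film => (PySem.Dict.ofList film).getD descriptor "" == v)).map
          (fun film => (PySem.Dict.ofList film).getD "Titre" "")))

-- ===== PRECONDITION & SPEC =====
-- A raises KeyError when some film lacks the descriptor key or the "Titre" key; Pre_ excludes exactly those inputs.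
def Pre_by_descriptor (films_by_title : List (String × List (String × String))) (descriptor : String) : Prop :=
  ∀ film ∈ (PySem.Dict.ofList films_by_title).values,
    (PySem.Dict.ofList film).contains descriptor = true ∧ (PySem.Dict.ofList film).contains "Titre" = true
instance (films_by_title : List (String × List (String × String))) (descriptor : String) : Decidable (Pre_by_descriptor films_by_title descriptor) := by unfold Pre_by_descriptor; infer_instance
def pvWitness_by_descriptor : (List (String × List (String × String))) × String :=
  ([("t1", [("Titre", "t1"), ("year", "2001")]), ("t2", [("Titre", "t2"), ("year", "1999")])], "year")
def Spec_by_descriptor (films_by_title : List (String × List (String × String))) (descriptor : String) (out : List (String × List String)) : Prop := out = by_descriptor_alt films_by_title descriptor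
instance (films_by_title : List (String × List (String × String))) (descriptor : String) (out : List (String × List String)) : Decidable (Spec_by_descriptor films_by_title descriptor out) := by unfold Spec_by_descriptor; infer_instance

-- ===== CLAIM (what is proved, stated in full; the proofs are below) =====
def Claim_equal_by_descriptor : Prop := ∀ (films_by_title : List (String × List (String × String))) (descriptor : String), Dom_by_descriptor films_by_title descriptor → Pre_by_descriptor films_by_title descriptor → Spec_by_descriptor films_by_title descriptor (by_descriptor films_by_title descriptor)

-- ===== LEMMAS AND PROOFS =====

-- A's body ("if absent, seed with []; then append") is one modify with default [].
theorem pvStep_eq (d : PySem.Dict String (List String)) (v : String) (x : String) :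
    (if d.contains v then d else d.insert v ([] : List String)).modify v [] (fun l => l ++ [x])
      = d.modify v [] (fun l => l ++ [x]) := by
  by_cases h : d.contains v = true
  · simp [h]
  · simp only [Bool.not_eq_true] at h
    simp [h, PySem.Dict.modify, PySem.Dict.getD_insert_self, PySem.Dict.insert_insert_self,
      PySem.Dict.getD_of_not_contains]

theorem by_descriptor_spec : Claim_equal_by_descriptor := by
  intro films_by_title descriptor _ _
  unfold Spec_by_descriptor by_descriptor by_descriptor_alt
  set films := (PySem.Dict.ofList films_by_title).values with hfilms
  set val : List (String × String) → String :=
    fun film => (PySem.Dict.ofList film).getD descriptor "" with hval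
  set ttl : List (String × String) → String :=
    fun film => (PySem.Dict.ofList film).getD "Titre" "" with httl
  -- collapse A's loop body to a single modify
  have hbody :
      (fun (fbd : PySem.Dict String (List String)) film =>
        let value := val film
        let fbd := if fbd.contains value then fbd else fbd.insert value ([] : List String)
        fbd.modify value [] (fun l => l ++ [ttl film]))
      = (fun fbd film => fbd.modify (val film) [] (fun l => l ++ [ttl film])) := by
    funext fbd film
    exact pvStep_eq fbd (val film) (ttl film)
  simp only []
  rw [hbody]
  set d := films.foldl (fun fbd film => fbd.modify (val film) [] (fun l => l ++ [ttl film]))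
      PySem.Dict.empty with hd
  have hnodup : d.keys.Nodup := by
    rw [hd]
    exact PySem.Dict.nodup_keys_foldl_modify_key films val [] _ _ PySem.Dict.nodup_keys_empty
  have hkeys : d.keys = PySem.Set.ofList (films.map val) := by
    rw [hd, PySem.Dict.keys_foldl_modify_key]
    simp [PySem.Dict.keys_empty, PySem.Set.update_nil_left, PySem.Set.ofList]
  have hgetD : ∀ v, d.getD v [] =
      (films.filter (fun film => val film == v)).map ttl := by
    intro v
    have : d = (films.map (fun film => (val film, ttl film))).foldl
        (fun d p => d.modify p.1 [] (fun l => l ++ [p.2])) PySem.Dict.empty := by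
      rw [hd, List.foldl_map]
    rw [this, PySem.Dict.getD_foldl_modify_append]
    simp [PySem.Dict.getD_empty, List.filter_map, List.map_map, Function.comp_def]
  have hitems : d.items = d.keys.map (fun k => (k, d.getD k [])) :=
    PySem.Dict.items_eq_map_keys d hnodup []
  -- name B's sorted key list
  set S := PySem.Set.ofList (films.map val) with hS
  have hSnodup : S.Nodup := PySem.Set.nodup_ofList _
  set g : String → List String :=
    fun v => (films.filter (fun film => val film == v)).map ttl with hg
  have hA : d.items = S.map (fun k => (k, g k)) := by
    rw [hitems, hkeys]
    exact List.map_congr_left (fun k _ => by rw [hgetD k])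
  rw [hA]
  -- the sorted key list, with strictly increasing keys
  have hperm : (PySem.List.sorted S (fun v => v) false).Perm S := PySem.List.sorted_perm S _ _
  have hle : (PySem.List.sorted S (fun v => v) false).Pairwise (fun a b => a ≤ b) :=
    PySem.List.sorted_pairwise S _
  have hnd : (PySem.List.sorted S (fun v => v) false).Nodup := hperm.nodup_iff.mpr hSnodup
  have hlt : (PySem.List.sorted S (fun v => v) false).Pairwise (fun a b => a < b) :=
    (hle.and hnd).imp (fun h => lt_of_le_of_ne h.1 h.2)
  -- sort-after-group = group-after-sort
  have := PySem.List.sorted_eq_of_perm_of_pairwise_lt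
    (xs := S.map (fun k => (k, g k))) (key := fun p : String × List String => p.1)
    (ys := (PySem.List.sorted S (fun v => v) false).map (fun k => (k, g k)))
    (hperm.map _) (by
      refine List.Pairwise.map _ ?_ hlt
      intro a b hab
      simpa using hab)
  rw [this]
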